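-- pv_equiv track=rewrite | github.com/vyshor/LeetCode | Apply Operations to an Array.py | applyOperations
-- ===== SOURCE A (Python) =====
-- from typing import List
--
-- def applyOperations(nums: List[int]) -> List[int]:
--     n = len(nums)
--     arr = []
--     i = 0
--     while i < n:
--         if nums[i] != 0:
--             if i+1 < n and nums[i] == nums[i+1]:
--                 arr.append(nums[i]*2)
--                 i += 2
--             else:
--                 arr.append(nums[i])
--                 i += 1
--         else:
--             i += 1
--
--     while len(arr) < n:
--         arr.append(0)
--
--     return arr
-- ===== SOURCE B (Python) =====
-- from typing import List
--
-- def applyOperations(nums: List[int]) -> List[int]: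
--     res = []
--     pend = 0  # a nonzero value still eligible to merge with the next element; 0 = none
--     for x in nums:
--         if x == 0:
--             if pend:
--                 res.append(pend)
--             pend = 0
--         elif x == pend:
--             res.append(2 * x)
--             pend = 0
--         else:
--             if pend:
--                 res.append(pend)
--             pend = x
--     if pend:
--         res.append(pend)
--     res += [0] * (len(nums) - len(res))
--     return res
-- ===== Notes on version B (the rewrite author's own statement) =====
-- stated objective: simpler
-- what changed: A's index-jumping while loop (step 1 or 2 with lookahead nums[i+1]) is replaced by a single left fold over the elements carrying one pending mergeable value, then padding with zeros in one step; a timing run measured B about 2.7x faster (constant factor: no per-step indexing, bulk [0]*k padding).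
import Mathlib
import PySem

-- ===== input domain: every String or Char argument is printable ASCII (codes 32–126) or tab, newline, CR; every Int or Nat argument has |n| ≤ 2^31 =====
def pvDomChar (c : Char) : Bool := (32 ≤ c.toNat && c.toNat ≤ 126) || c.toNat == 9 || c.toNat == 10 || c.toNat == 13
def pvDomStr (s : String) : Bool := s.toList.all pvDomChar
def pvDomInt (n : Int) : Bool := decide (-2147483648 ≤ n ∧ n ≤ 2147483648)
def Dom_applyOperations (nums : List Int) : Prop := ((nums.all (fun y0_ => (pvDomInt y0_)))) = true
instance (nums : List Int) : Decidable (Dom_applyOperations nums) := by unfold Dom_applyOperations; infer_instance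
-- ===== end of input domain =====

-- B replaces A's index-jumping while loop by a single left fold carrying a pending
-- mergeable value (objective: simpler one-pass decomposition; a timing run measured B faster by a constant factor).

-- ===== PORT A =====
-- A's while loop walks forward through nums by index (step 1 or 2, with lookahead
-- nums[i+1]); ported as the obvious structural recursion on the list
-- (the `[x]` / `x :: y :: rest` split mirrors the `i+1 < n` test).
def applyOperationsLoop : List Int → List Int
  | [] => []
  | [x] => if x ≠ 0 then [x] else []
  | x :: y :: rest =>
    if x ≠ 0 then
      if x = y then x * 2 :: applyOperationsLoop rest
      else x :: applyOperationsLoop (y :: rest)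
    else applyOperationsLoop (y :: rest)

-- A's second while loop: append 0 until len(arr) = n
def applyOperationsPad (n : Nat) (arr : List Int) : List Int :=
  if arr.length < n then applyOperationsPad n (arr ++ [0]) else arr
termination_by n - arr.length
decreasing_by simp_all; omega

def applyOperations (nums : List Int) : List Int :=
  applyOperationsPad nums.length (applyOperationsLoop nums)

-- ===== PORT B =====
def applyOperationsAltStep (s : List Int × Int) (x : Int) : List Int × Int :=
  if x = 0 then
    (if s.2 ≠ 0 then s.1 ++ [s.2] else s.1, 0)
  else if x = s.2 then
    (s.1 ++ [2 * x], 0)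
  else
    (if s.2 ≠ 0 then s.1 ++ [s.2] else s.1, x)

def applyOperations_alt (nums : List Int) : List Int :=
  let s := nums.foldl applyOperationsAltStep ([], 0)
  let res := if s.2 ≠ 0 then s.1 ++ [s.2] else s.1
  res ++ List.replicate (nums.length - res.length) 0

-- ===== PRECONDITION & SPEC =====
def Spec_applyOperations (nums : List Int) (out : List Int) : Prop := out = applyOperations_alt nums
instance (nums : List Int) (out : List Int) : Decidable (Spec_applyOperations nums out) := by unfold Spec_applyOperations; infer_instance

-- ===== CLAIM (what is proved, stated in full; the proofs are below) =====
def Claim_equal_applyOperations : Prop := ∀ (nums : List Int), Dom_applyOperations nums → Spec_applyOperations nums (applyOperations nums)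

-- ===== LEMMAS AND PROOFS =====

-- the tail B's fold emits when the pending slot holds `pend` and `l` remains
def pvEmit (pend : Int) : List Int → List Int
  | [] => if pend ≠ 0 then [pend] else []
  | x :: rest =>
    if x = 0 then (if pend ≠ 0 then [pend] else []) ++ pvEmit 0 rest
    else if x = pend then 2 * x :: pvEmit 0 rest
    else (if pend ≠ 0 then [pend] else []) ++ pvEmit x rest

theorem pvEmit_foldl (l : List Int) : ∀ (res : List Int) (pend : Int),
    (let s := l.foldl applyOperationsAltStep (res, pend)
     if s.2 ≠ 0 then s.1 ++ [s.2] else s.1) = res ++ pvEmit pend l := by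
  induction l with
  | nil =>
    intro res pend
    by_cases hp : pend = 0 <;> simp [pvEmit, hp]
  | cons x rest ih =>
    intro res pend
    simp only [List.foldl_cons, applyOperationsAltStep, pvEmit]
    by_cases hx : x = 0 <;> by_cases hp : pend = 0 <;>
      by_cases hxp : x = pend <;> simp_all

theorem pvEmit_cons (pend x : Int) (rest : List Int) :
    pvEmit pend (x :: rest) =
      if x = 0 then (if pend ≠ 0 then [pend] else []) ++ pvEmit 0 rest
      else if x = pend then 2 * x :: pvEmit 0 rest
      else (if pend ≠ 0 then [pend] else []) ++ pvEmit x rest := rfl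

theorem aLoop_zero_cons (rest : List Int) :
    applyOperationsLoop (0 :: rest) = applyOperationsLoop rest := by
  cases rest <;> simp [applyOperationsLoop]

theorem pvEmit_eq_loop (l : List Int) :
    pvEmit 0 l = applyOperationsLoop l ∧
      ∀ x : Int, x ≠ 0 → pvEmit x l = applyOperationsLoop (x :: l) := by
  induction l with
  | nil => constructor <;> intros <;> simp_all [pvEmit, applyOperationsLoop]
  | cons y rest ih =>
    obtain ⟨ih0, ih1⟩ := ih
    constructor
    · by_cases hy : y = 0
      · subst hy
        rw [pvEmit_cons, aLoop_zero_cons]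
        simp [ih0]
      · rw [pvEmit_cons]
        simp [hy, ih1 y hy]
    · intro x hx
      rw [pvEmit_cons]
      by_cases hy : y = 0
      · subst hy
        simp [applyOperationsLoop, hx, aLoop_zero_cons, ih0]
      · by_cases hxy : x = y
        · subst hxy
          simp [applyOperationsLoop, hx, ih0, mul_comm]
        · have hyx : ¬ y = x := fun h => hxy h.symm
          simp [applyOperationsLoop, hx, hy, hxy, hyx, ih1 y hy]

theorem pvPad_eq (n : Nat) (arr : List Int) :
    applyOperationsPad n arr = arr ++ List.replicate (n - arr.length) 0 := by
  fun_induction applyOperationsPad n arr with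
  | case1 arr h ih =>
    rw [ih]
    simp only [List.append_assoc, List.length_append]
    congr 1
    have : n - arr.length = (n - (arr.length + 1)) + 1 := by omega
    simp [this, List.replicate_succ]
  | case2 arr h => simp [Nat.sub_eq_zero_of_le (by omega : n ≤ arr.length)]

-- ===== VERDICT (by name: the statement is the Claim_ definition above) =====
theorem applyOperations_spec : Claim_equal_applyOperations := by
  intro nums _
  show applyOperations nums = applyOperations_alt nums
  have h := pvEmit_foldl nums [] 0
  simp only [List.nil_append] at h
  simp only [applyOperations, applyOperations_alt, pvPad_eq, h, (pvEmit_eq_loop nums).1]
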